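-- pv_equiv track=rewrite | github.com/wisk/isabelle | exe/arch_arm.py | _ARM_GetMask
-- ===== SOURCE A (Python) =====
-- def _ARM_GetMask(insn):
--     enc = insn['encoding']
--     res = 0x0
--     off = 0x0
--     for bit in enc[::-1]:
--         if bit in [ '0', '1', '(0)', '(1)' ]:
--             res |= (1 << off)
--
--         if '#' in bit:
--             off += int(bit.split('#')[1])
--         else:
--             off += 1
--     return res
-- ===== SOURCE B (Python) =====
-- def _ARM_GetMask(insn):
--     res = 0
--     for bit in insn['encoding']:
--         if '#' in bit:
--             res <<= int(bit.split('#')[1])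
--         else:
--             res = res * 2 + (bit in ('0', '1', '(0)', '(1)'))
--     return res
-- ===== Notes on version B (the rewrite author's own statement) =====
-- stated objective: simpler
-- what changed: B walks the encoding forward and accumulates the mask by shifting it left per field (Horner style), instead of A's reversed walk with an explicit bit-offset counter and per-bit OR of 1<<off.
-- outside the precondition, e.g. on _ARM_GetMask({'encoding': ['0#-1']}): A returns 0, B raises ValueError
import Mathlib
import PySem

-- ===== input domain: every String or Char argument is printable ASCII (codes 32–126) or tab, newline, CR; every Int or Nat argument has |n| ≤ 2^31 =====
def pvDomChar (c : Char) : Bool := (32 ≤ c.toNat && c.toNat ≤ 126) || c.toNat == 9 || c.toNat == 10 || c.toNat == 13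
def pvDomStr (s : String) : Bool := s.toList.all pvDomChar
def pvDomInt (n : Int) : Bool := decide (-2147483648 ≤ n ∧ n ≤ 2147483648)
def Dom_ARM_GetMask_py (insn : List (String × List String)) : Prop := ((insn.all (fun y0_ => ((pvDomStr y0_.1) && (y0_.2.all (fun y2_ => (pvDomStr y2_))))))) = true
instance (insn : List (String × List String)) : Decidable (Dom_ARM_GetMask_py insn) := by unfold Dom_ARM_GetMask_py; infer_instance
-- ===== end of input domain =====

-- B builds the mask by a forward Horner-style walk (shift the accumulator left per field)
-- instead of A's reversed walk with an explicit bit-offset counter; return values proved equal on Pre_.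

-- int(bit.split('#')[1]) — shared verbatim by both Pythons; `.getD` defaults are only
-- reached where Python raises (ValueError / IndexError), which Pre_ excludes.
def pvHashW (bit : String) : Int :=
  (PySem.Int.ofStr? ((PySem.List.pyGet? ((PySem.Str.split? bit "#").getD []) 1).getD "")).getD 0

-- ===== PORT A =====
-- loop body of A: state (res, off); `1 << off` ported as `1 <<< off.toNat` (exact for off ≥ 0,
-- which holds throughout under Pre_; Python raises for off < 0, excluded by Pre_).
def pvStepA (st : Int × Int) (bit : String) : Int × Int :=
  let res := if bit ∈ ["0", "1", "(0)", "(1)"] then PySem.Int.bor st.1 ((1 : Int) <<< st.2.toNat) else st.1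
  let off := st.2 + (if PySem.Str.isIn "#" bit then pvHashW bit else 1)
  (res, off)

def ARM_GetMask_py (insn : List (String × List String)) : Int :=
  match insn.lookup "encoding" with
  | none => 0  -- Python: KeyError; excluded by Pre_
  | some enc =>
    (((PySem.List.slice? enc none none (-1)).getD []).foldl pvStepA ((0 : Int), (0 : Int))).1

-- ===== PORT B =====
-- loop body of B: single Int accumulator, forward order; `res <<= w` ported via `.toNat`
-- (exact for w ≥ 0, which Pre_ guarantees; Python raises for w < 0).
def pvStepB (res : Int) (bit : String) : Int :=
  if PySem.Str.isIn "#" bit then res <<< (pvHashW bit).toNat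
  else res * 2 + (if bit ∈ ["0", "1", "(0)", "(1)"] then 1 else 0)

def ARM_GetMask_py_alt (insn : List (String × List String)) : Int :=
  match insn.lookup "encoding" with
  | none => 0  -- Python: KeyError; excluded by Pre_
  | some enc => enc.foldl pvStepB 0

-- ===== PRECONDITION & SPEC =====
-- Pre_ excludes: a missing 'encoding' key (KeyError in both), '#'-bits whose width does not
-- parse as an int (ValueError in both), and '#'-bits with a NEGATIVE width, on which A may
-- still return a value (when no literal bit follows) while B's left shift raises ValueError.
def Pre_ARM_GetMask_py (insn : List (String × List String)) : Prop :=
  (insn.lookup "encoding").isSome = true ∧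
  ∀ bit ∈ (insn.lookup "encoding").getD [], PySem.Str.isIn "#" bit = true →
      PySem.Int.ofStr? ((PySem.List.pyGet? ((PySem.Str.split? bit "#").getD []) 1).getD "") ≠ none ∧ 0 ≤ pvHashW bit
instance (insn : List (String × List String)) : Decidable (Pre_ARM_GetMask_py insn) := by
  unfold Pre_ARM_GetMask_py; infer_instance

def pvWitness_ARM_GetMask_py : (List (String × List String)) :=
  [("encoding", ["1", "0", "x", "(1)", "imm#3", "0"])]

def Spec_ARM_GetMask_py (insn : List (String × List String)) (out : Int) : Prop := out = ARM_GetMask_py_alt insn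
instance (insn : List (String × List String)) (out : Int) : Decidable (Spec_ARM_GetMask_py insn out) := by unfold Spec_ARM_GetMask_py; infer_instance

-- ===== CLAIM (what is proved, stated in full; the proofs are below) =====
def Claim_equal_ARM_GetMask_py : Prop := ∀ (insn : List (String × List String)), Dom_ARM_GetMask_py insn → Pre_ARM_GetMask_py insn → Spec_ARM_GetMask_py insn (ARM_GetMask_py insn)

-- ===== LEMMAS AND PROOFS =====

-- bit width contributed by one token, and by a token list
def pvW (bit : String) : Nat := if PySem.Str.isIn "#" bit then (pvHashW bit).toNat else 1
def pvWs (l : List String) : Nat := (l.map pvW).sum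

theorem pvWs_cons (b : String) (l : List String) : pvWs (b :: l) = pvW b + pvWs l := by
  simp [pvWs]

-- B's fold is linear in its accumulator (Horner form)
theorem foldB_linear : ∀ (l : List String) (r : Int),
    l.foldl pvStepB r = r * 2 ^ pvWs l + l.foldl pvStepB 0 := by
  intro l
  induction l with
  | nil => intro r; simp [pvWs]
  | cons b l ih =>
    intro r
    have hstep : ∀ r : Int, pvStepB r b = r * 2 ^ pvW b + pvStepB 0 b := by
      intro r
      simp only [pvStepB, pvW]
      split
      · simp [Int.shiftLeft_eq]
      · push_cast; ring
    simp only [List.foldl_cons]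
    rw [ih (pvStepB r b), ih (pvStepB 0 b), hstep r, pvWs_cons, pow_add]
    ring

-- B's fold from 0 is a nonnegative value below 2^(total width)
theorem foldB_bounds : ∀ (l : List String),
    0 ≤ l.foldl pvStepB 0 ∧ l.foldl pvStepB 0 < 2 ^ pvWs l := by
  intro l
  induction l with
  | nil => simp [pvWs]
  | cons b l ih =>
    obtain ⟨h0, h1⟩ := ih
    have hb : (0 : Int) ≤ pvStepB 0 b ∧ pvStepB 0 b ≤ 2 ^ pvW b - 1 := by
      simp only [pvStepB, pvW]
      split
      · rw [Int.zero_shiftLeft]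
        have : (1:Int) ≤ 2 ^ (pvHashW b).toNat := one_le_pow₀ (by norm_num)
        omega
      · split <;> norm_num
    simp only [List.foldl_cons]
    rw [foldB_linear l (pvStepB 0 b), pvWs_cons, pow_add]
    constructor
    · have := hb.1
      nlinarith [pow_pos (by norm_num : (0:Int) < 2) (pvWs l)]
    · have := hb.2
      nlinarith [pow_pos (by norm_num : (0:Int) < 2) (pvWs l)]

theorem nat_lor_two_pow_of_lt : ∀ (n m : Nat), m < 2 ^ n → m ||| 2 ^ n = m + 2 ^ n := by
  intro n
  induction n with
  | zero => intro m h; interval_cases m; decide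
  | succ n ih =>
    intro m h
    have hm : m = Nat.bit (m % 2 = 1) (m / 2) := by
      simp [Nat.bit]; by_cases h2 : m % 2 = 1 <;> simp [h2] <;> omega
    have hp : 2 ^ (n + 1) = Nat.bit false (2 ^ n) := by simp [Nat.bit]; ring
    rw [hm, hp, Nat.lor_bit, ih (m / 2) (by omega)]
    simp [Nat.bit]
    by_cases h2 : m % 2 = 1 <;> simp [h2] <;> ring

theorem int_bor_one_shiftLeft {r : Int} {n : Nat} (h0 : 0 ≤ r) (h : r < 2 ^ n) :
    PySem.Int.bor r ((1 : Int) <<< n) = r + 2 ^ n := by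
  obtain ⟨m, rfl⟩ := Int.eq_ofNat_of_zero_le h0
  have h1 : (1 : Int) <<< n = ((2 ^ n : Nat) : Int) := by
    rw [Int.shiftLeft_eq]; push_cast; ring
  have h2 : (m : Nat) < 2 ^ n := by exact_mod_cast h
  rw [h1, PySem.Int.bor_natCast, nat_lor_two_pow_of_lt n m h2]
  push_cast; ring

-- the four literal bit tokens contain no '#'
theorem lit_no_hash {b : String} (h : b ∈ ["0", "1", "(0)", "(1)"]) :
    PySem.Str.isIn "#" b = false := by
  fin_cases h <;> decide

-- main invariant: A's reversed fold (as a foldr) equals (B's fold, total width)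
theorem foldA_eq : ∀ (l : List String),
    (∀ bit ∈ l, PySem.Str.isIn "#" bit = true → 0 ≤ pvHashW bit) →
    l.foldr (fun b st => pvStepA st b) ((0 : Int), (0 : Int)) = (l.foldl pvStepB 0, (pvWs l : Int)) := by
  intro l
  induction l with
  | nil => intro _; simp [pvWs]
  | cons b l ih =>
    intro hok
    have hl : ∀ bit ∈ l, PySem.Str.isIn "#" bit = true → 0 ≤ pvHashW bit := by
      intro bit hb; exact hok bit (List.mem_cons_of_mem _ hb)
    simp only [List.foldr_cons]
    rw [ih hl]
    simp only [pvStepA, Prod.mk.injEq]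
    obtain ⟨hB0, hB1⟩ := foldB_bounds l
    have hBs : (b :: l).foldl pvStepB 0 = pvStepB 0 b * 2 ^ pvWs l + l.foldl pvStepB 0 := by
      simp only [List.foldl_cons]; exact foldB_linear l (pvStepB 0 b)
    by_cases hh : PySem.Str.isIn "#" b = true
    · have hlit : ¬ b ∈ ["0", "1", "(0)", "(1)"] := by
        intro hmem; rw [lit_no_hash hmem] at hh; exact Bool.false_ne_true hh
      have hw := hok b List.mem_cons_self hh
      simp only [hh, if_true, hlit, if_false]
      constructor
      · rw [hBs]
        simp only [pvStepB, hh, if_true, Int.zero_shiftLeft]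
        ring
      · rw [pvWs_cons]; simp only [pvW, hh, if_true]
        push_cast [Int.toNat_of_nonneg hw]; ring
    · simp only [hh]
      rw [hBs]
      by_cases hlit : b ∈ ["0", "1", "(0)", "(1)"]
      · simp only [hlit, if_true]
        constructor
        · rw [Int.toNat_natCast, int_bor_one_shiftLeft hB0 hB1]
          simp only [pvStepB, hh, hlit, if_true]
          push_cast; ring
        · rw [pvWs_cons]; simp only [pvW, hh]; push_cast; ring
      · simp only [hlit, if_false]
        constructor
        · simp only [pvStepB, hh, if_false, hlit]
          push_cast; ring
        · rw [pvWs_cons]; simp only [pvW, hh]; push_cast; ring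

-- ===== VERDICT (by name: the statement is the Claim_ definition above) =====
theorem ARM_GetMask_py_spec : Claim_equal_ARM_GetMask_py := by
  intro insn _ hpre
  unfold Spec_ARM_GetMask_py ARM_GetMask_py ARM_GetMask_py_alt
  unfold Pre_ARM_GetMask_py at hpre
  obtain ⟨hsome, hbits⟩ := hpre
  cases hlk : insn.lookup "encoding" with
  | none => rw [hlk] at hsome
  | some enc =>
    rw [hlk] at hbits
    dsimp only
    rw [PySem.List.slice?_none_none_neg_one, Option.getD_some, List.foldl_reverse]
    have hok : ∀ bit ∈ enc, PySem.Str.isIn "#" bit = true → 0 ≤ pvHashW bit := by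
      intro bit hb hh; exact (hbits bit (by simpa using hb) hh).2
    rw [foldA_eq enc hok]
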